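-- pv_equiv track=rewrite | github.com/sdh1223/Programmers_Python | 프로그래머스/3/12987. 숫자 게임/숫자 게임.py | solution
-- ===== SOURCE A (Python) =====
-- def solution(A, B):
--     answer = 0
--     A.sort(reverse=True) # A를 큰 수부터 오게 정렬
--     B.sort(reverse=True) # B를 큰 수부터 오게 정렬
--     while A:
--         if B[0] > A[0]: # B가 큰 경우 가장 큰 수로 승리
--             answer += 1
--             A.pop(0)
--             B.pop(0)
--         else: # A가 큰 경우 절대 못 이기므로 가장 작은 수로 패배
--             A.pop(0)
--             B.pop(-1)
--     return answer
-- ===== SOURCE B (Python) =====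
-- def solution(A, B):
--     A2 = sorted(A, reverse=True)
--     B2 = sorted(B, reverse=True)
--     answer = 0
--     j = 0
--     for a in A2:
--         if B2[j] > a:
--             answer += 1
--             j += 1
--     return answer
-- ===== Notes on version B (the rewrite author's own statement) =====
-- stated objective: faster
-- what changed: Replaced the destructive while-loop that pops from the front/back of both lists (each pop(0) is O(n)) by a single pass over a sorted copy of A with an index pointer into a sorted copy of B; B does not mutate its arguments.
import Mathlib
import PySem

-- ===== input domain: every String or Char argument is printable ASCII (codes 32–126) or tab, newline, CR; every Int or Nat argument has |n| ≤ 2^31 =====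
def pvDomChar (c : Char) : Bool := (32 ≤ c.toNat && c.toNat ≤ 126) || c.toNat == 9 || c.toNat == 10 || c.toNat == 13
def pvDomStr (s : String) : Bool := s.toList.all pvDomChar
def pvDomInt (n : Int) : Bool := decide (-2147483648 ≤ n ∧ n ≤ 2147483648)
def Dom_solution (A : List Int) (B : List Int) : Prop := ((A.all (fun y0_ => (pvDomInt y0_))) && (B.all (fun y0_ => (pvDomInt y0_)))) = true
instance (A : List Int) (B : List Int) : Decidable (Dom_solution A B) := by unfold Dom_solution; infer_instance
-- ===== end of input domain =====

-- B replaces A's destructive pop(0)/pop(-1) while-loop with one pass over sorted copies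
-- using an index pointer into B (faster in a timing run). NOTE: Python A sorts its
-- argument lists in place (caller-visible mutation); equivalence here is about the return value only.

-- ===== PORT A =====
-- the while-loop: pops A[0] each turn; win pops B[0], loss pops B[-1]
def solutionLoop : List Int → List Int → Int
  | [], _ => 0
  | _ :: _, [] => 0  -- unreachable under Pre_solution: Python raises IndexError at B[0]
  | a :: A', b :: B' => if b > a then 1 + solutionLoop A' B' else solutionLoop A' ((b :: B').dropLast)

def solution (A : List Int) (B : List Int) : Int :=
  let A2 := PySem.List.sorted A (fun x => x) true
  let B2 := PySem.List.sorted B (fun x => x) true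
  solutionLoop A2 B2

-- ===== PORT B =====
def solution_alt (A : List Int) (B : List Int) : Int :=
  let A2 := PySem.List.sorted A (fun x => x) true
  let B2 := PySem.List.sorted B (fun x => x) true
  (A2.foldl (fun (s : Int × Int) a =>
      if PySem.List.pyGetD B2 s.2 0 > a then (s.1 + 1, s.2 + 1) else s)
    ((0 : Int), (0 : Int))).1

-- ===== PRECONDITION & SPEC =====
-- Pre_ excludes exactly the inputs where Python A raises IndexError (B runs out while A is nonempty)
def Pre_solution (A : List Int) (B : List Int) : Prop := A.length ≤ B.length
instance (A : List Int) (B : List Int) : Decidable (Pre_solution A B) := by unfold Pre_solution; infer_instance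
def pvWitness_solution : List Int × List Int := ([3, 1, 5], [2, 4, 6])

def Spec_solution (A : List Int) (B : List Int) (out : Int) : Prop := out = solution_alt A B
instance (A : List Int) (B : List Int) (out : Int) : Decidable (Spec_solution A B out) := by unfold Spec_solution; infer_instance

-- ===== CLAIM (what is proved, stated in full; the proofs are below) =====
def Claim_equal_solution : Prop := ∀ (A : List Int) (B : List Int), Dom_solution A B → Pre_solution A B → Spec_solution A B (solution A B)

-- ===== LEMMAS AND PROOFS =====

-- pointer-style loop: a loss keeps y unchanged instead of dropping its last element
def loopC : List Int → List Int → Int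
  | [], _ => 0
  | _ :: _, [] => 0
  | a :: x', b :: y' => if b > a then 1 + loopC x' y' else loopC x' (b :: y')

-- take x.length of (b :: y) is unchanged by pre-truncating y at x.length
theorem take_cons_take (b : Int) (y : List Int) (k : Nat) :
    (b :: y.take k).take k = (b :: y).take k := by
  cases k with
  | zero => simp
  | succ n => simp [List.take_take]

-- loopC only looks at the first x.length elements of y
theorem loopC_take : ∀ (x y : List Int), loopC x y = loopC x (y.take x.length)
  | [], y => by simp [loopC]
  | _ :: _, [] => by simp [loopC]
  | a :: x', b :: y' => by
    rw [List.length_cons, List.take_succ_cons]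
    show (if b > a then 1 + loopC x' y' else loopC x' (b :: y'))
       = (if b > a then 1 + loopC x' (y'.take x'.length) else loopC x' (b :: y'.take x'.length))
    by_cases h : b > a
    · rw [if_pos h, if_pos h, loopC_take x' y']
    · rw [if_neg h, if_neg h, loopC_take x' (b :: y'), loopC_take x' (b :: y'.take x'.length)]
      rw [take_cons_take]

-- A's pop-based loop agrees with the pointer-style loop when y is long enough
theorem solutionLoop_eq_loopC : ∀ (x y : List Int), x.length ≤ y.length → solutionLoop x y = loopC x y
  | [], y, _ => by simp [solutionLoop, loopC]
  | a :: x', [], h => by simp at h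
  | a :: x', b :: y', h => by
    have hlen : x'.length ≤ y'.length := by simpa using h
    show (if b > a then 1 + solutionLoop x' y' else solutionLoop x' ((b :: y').dropLast))
       = (if b > a then 1 + loopC x' y' else loopC x' (b :: y'))
    by_cases hw : b > a
    · rw [if_pos hw, if_pos hw, solutionLoop_eq_loopC x' y' hlen]
    · rw [if_neg hw, if_neg hw]
      rw [solutionLoop_eq_loopC x' ((b :: y').dropLast) (by simp; omega)]
      rw [loopC_take x' ((b :: y').dropLast), loopC_take x' (b :: y')]
      congr 1
      rw [List.dropLast_eq_take, List.take_take]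
      congr 1
      simp
      omega

-- the foldl with an index pointer computes loopC on the corresponding suffix of y0
theorem foldl_eq_loopC (y0 : List Int) (x : List Int) : ∀ (n : Nat) (ans : Int),
    n + x.length ≤ y0.length →
    (x.foldl (fun (s : Int × Int) a =>
        if PySem.List.pyGetD y0 s.2 0 > a then (s.1 + 1, s.2 + 1) else s) (ans, (n : Int))).1
      = ans + loopC x (y0.drop n) := by
  induction x with
  | nil => intro n ans _; simp [loopC]
  | cons a x' ih =>
    intro n ans h
    have hn : n < y0.length := by simp at h; omega
    have hdrop : y0.drop n = y0[n] :: y0.drop (n + 1) := List.drop_eq_getElem_cons hn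
    have hget : PySem.List.pyGetD y0 ((n : Nat) : Int) 0 = y0[n] := by
      rw [PySem.List.pyGetD_natCast]
      exact List.getD_eq_getElem y0 0 hn
    rw [List.foldl_cons, hget, hdrop]
    show ((x'.foldl _ (if y0[n] > a then (ans + 1, (n : Int) + 1) else (ans, (n : Int)))).1 : Int)
       = ans + loopC (a :: x') (y0[n] :: y0.drop (n + 1))
    have hloop : loopC (a :: x') (y0[n] :: y0.drop (n + 1))
        = if y0[n] > a then 1 + loopC x' (y0.drop (n + 1)) else loopC x' (y0[n] :: y0.drop (n + 1)) := rfl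
    by_cases hw : y0[n] > a
    · rw [if_pos hw, hloop, if_pos hw]
      have hcast : ((n : Int) + 1) = ((n + 1 : Nat) : Int) := by push_cast; ring
      rw [hcast, ih (n + 1) (ans + 1) (by simp at h ⊢; omega)]
      ring
    · rw [if_neg hw, hloop, if_neg hw]
      rw [ih n ans (by simp at h ⊢; omega), hdrop]

-- ===== VERDICT (by name: the statement is the Claim_ definition above) =====
theorem solution_spec : Claim_equal_solution := by
  intro A B _ hpre
  unfold Spec_solution solution solution_alt
  set A2 := PySem.List.sorted A (fun x => x) true with hA2
  set B2 := PySem.List.sorted B (fun x => x) true with hB2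
  have hlen : A2.length ≤ B2.length := by
    rw [hA2, hB2, PySem.List.length_sorted, PySem.List.length_sorted]
    exact hpre
  have h1 := foldl_eq_loopC B2 A2 0 0 (by omega)
  simp only [Nat.cast_zero, List.drop_zero, zero_add] at h1
  rw [h1, solutionLoop_eq_loopC A2 B2 hlen]
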